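-- pv_equiv track=rewrite | github.com/schellenberg/wmci-acsl | contest 1 solutions/senior-contest-2014-15/navigating_acslland.py | find_distance_from
-- ===== SOURCE A (Python) =====
-- def find_distance_from(city1, city2):
--     distance_list = [450, 140, 125, 365, 250, 160, 380, 235, 320]
--     location_values = {"A":0, "B":1, "C":2, "D":3, "E":4, "F":5, "G":6, "H":7, "J":8, "K":9}
--
--     #remember we will go up to, but not including the ending_spot in the for loop
--     starting_spot = location_values[city1]
--     ending_spot = location_values[city2]
--
--     total_distance = 0
--     for distance_travelled in distance_list[starting_spot:ending_spot]:
--         total_distance += distance_travelled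
--
--     return total_distance
-- ===== SOURCE B (Python) =====
-- def find_distance_from(city1, city2):
--     distances = [450, 140, 125, 365, 250, 160, 380, 235, 320]
--     letters = "ABCDEFGHJK"
--     prefix = [0]
--     for d in distances:
--         prefix.append(prefix[-1] + d)
--     i = letters.index(city1)
--     j = letters.index(city2)
--     return prefix[j] - prefix[i] if j > i else 0
-- ===== Notes on version B (the rewrite author's own statement) =====
-- stated objective: alternative
-- what changed: Replaces the per-query accumulation loop over a slice with a prefix-sum table plus a single subtraction (guarded for the empty-slice case).
import Mathlib
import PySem

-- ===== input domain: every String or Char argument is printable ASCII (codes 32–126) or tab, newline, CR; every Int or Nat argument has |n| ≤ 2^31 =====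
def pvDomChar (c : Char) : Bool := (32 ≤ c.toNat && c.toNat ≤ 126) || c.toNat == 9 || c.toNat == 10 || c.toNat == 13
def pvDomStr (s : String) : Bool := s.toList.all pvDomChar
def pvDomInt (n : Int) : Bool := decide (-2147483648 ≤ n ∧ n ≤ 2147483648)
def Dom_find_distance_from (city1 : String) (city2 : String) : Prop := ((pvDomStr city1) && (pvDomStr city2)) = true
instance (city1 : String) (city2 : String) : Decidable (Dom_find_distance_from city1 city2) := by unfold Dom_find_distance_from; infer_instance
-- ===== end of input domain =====

-- ===== PORT A =====
-- B replaces the accumulation loop over a slice by a prefix-sum table and one subtraction (alternative decomposition).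
-- Port of A: dict lookup (KeyError excluded by Pre_), slice, accumulation loop.
def find_distance_from (city1 : String) (city2 : String) : Int :=
  let distance_list : List Int := [450, 140, 125, 365, 250, 160, 380, 235, 320]
  let location_values : PySem.Dict String Int := PySem.Dict.ofList
    [("A",0), ("B",1), ("C",2), ("D",3), ("E",4), ("F",5), ("G",6), ("H",7), ("J",8), ("K",9)]
  let starting_spot : Int := (location_values.get? city1).getD 0   -- none = KeyError, outside Pre_
  let ending_spot : Int := (location_values.get? city2).getD 0
  (PySem.List.slice distance_list (some starting_spot) (some ending_spot)).foldl (fun acc d => acc + d) 0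

-- ===== PORT B =====
def find_distance_from_alt (city1 : String) (city2 : String) : Int :=
  let distances : List Int := [450, 140, 125, 365, 250, 160, 380, 235, 320]
  let letters : String := "ABCDEFGHJK"
  let pref : List Int := distances.foldl (fun p d => p ++ [((PySem.List.pyGet? p (-1)).getD 0) + d]) ([0] : List Int)
  let i : Int := PySem.Str.find letters city1   -- -1 = ValueError in Python, outside Pre_
  let j : Int := PySem.Str.find letters city2
  if j > i then ((PySem.List.pyGet? pref j).getD 0) - ((PySem.List.pyGet? pref i).getD 0) else 0

-- ===== PRECONDITION & SPEC =====
-- A raises KeyError (and B ValueError) unless both city names are one of the ten single letters A-H, J, K.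
def Pre_find_distance_from (city1 : String) (city2 : String) : Prop :=
  city1 ∈ ["A","B","C","D","E","F","G","H","J","K"] ∧ city2 ∈ ["A","B","C","D","E","F","G","H","J","K"]
instance (city1 : String) (city2 : String) : Decidable (Pre_find_distance_from city1 city2) := by unfold Pre_find_distance_from; infer_instance
def pvWitness_find_distance_from : String × String := ("A", "C")
def Spec_find_distance_from (city1 : String) (city2 : String) (out : Int) : Prop := out = find_distance_from_alt city1 city2
instance (city1 : String) (city2 : String) (out : Int) : Decidable (Spec_find_distance_from city1 city2 out) := by unfold Spec_find_distance_from; infer_instance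

-- ===== CLAIM (what is proved, stated in full; the proofs are below) =====
def Claim_equal_find_distance_from : Prop := ∀ (city1 : String) (city2 : String), Dom_find_distance_from city1 city2 → Pre_find_distance_from city1 city2 → Spec_find_distance_from city1 city2 (find_distance_from city1 city2)

-- ===== LEMMAS AND PROOFS =====

-- ===== VERDICT (by name: the statement is the Claim_ definition above) =====
theorem find_distance_from_spec : Claim_equal_find_distance_from := by
  intro c1 c2 _ hp
  obtain ⟨h1, h2⟩ := hp
  fin_cases h1 <;> fin_cases h2 <;> decide
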